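-- pv_equiv track=rewrite | github.com/tal-franji/java_examples_2024 | python/sample_letter.py | calc_prefix_counts
-- ===== SOURCE A (Python) =====
-- LOOK_BACK = 2
--
-- def calc_prefix_counts(text):
--     counts = dict()
--     for word in text.split():
--         word_pad = word + " "
--         key = " " * LOOK_BACK
--         for c in word_pad:
--             counts_char = counts.get(key, dict())
--             n = counts_char.get(c, 0)
--             counts_char[c] = n + 1
--             counts[key] = counts_char
--             key = key[1:] + c
--     return counts
-- ===== SOURCE B (Python) =====
-- LOOK_BACK = 2
--
-- def calc_prefix_counts(text):
--     # phase 1: flat (context, successor-char) pairs via zip over the padded word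
--     pairs = []
--     for word in text.split():
--         s = " " * LOOK_BACK + word + " "
--         pairs += zip((a + b for a, b in zip(s, s[1:])), s[2:])
--     # phase 2: group successor chars per context (no counting yet)
--     groups = {}
--     for ctx, ch in pairs:
--         groups.setdefault(ctx, []).append(ch)
--     # phase 3: turn each group's char list into counts by dedup + rescans
--     return {ctx: {ch: chs.count(ch) for ch in dict.fromkeys(chs)}
--             for ctx, chs in groups.items()}
-- ===== Notes on version B (the rewrite author's own statement) =====
-- stated objective: alternative
-- what changed: A makes one pass sliding a 2-char key through each word and incrementing a nested context->char->count dict as it goes; B never increments a counter: it extracts the flat (context, successor) pairs by zipping the padded word with its shifts, groups the successor characters per context into plain lists in a second phase, and in a third phase turns each group into counts by deduplicating it and rescanning with list.count.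
import Mathlib
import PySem

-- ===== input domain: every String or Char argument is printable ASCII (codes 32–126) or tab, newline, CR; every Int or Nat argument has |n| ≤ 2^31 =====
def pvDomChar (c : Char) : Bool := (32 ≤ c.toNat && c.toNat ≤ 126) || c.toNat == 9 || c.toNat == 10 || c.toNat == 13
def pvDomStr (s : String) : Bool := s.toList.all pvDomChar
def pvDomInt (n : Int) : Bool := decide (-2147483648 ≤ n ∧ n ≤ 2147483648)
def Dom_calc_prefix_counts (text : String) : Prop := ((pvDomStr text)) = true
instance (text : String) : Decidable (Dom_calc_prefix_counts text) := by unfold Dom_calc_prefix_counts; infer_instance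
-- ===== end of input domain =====

-- B replaces A's single-pass incremental nested counting by a three-phase pipeline:
-- zip-extract (context, successor) pairs, group successors per context into lists,
-- then count each group by dedup + rescans (objective: alternative, not faster).

-- ===== PORT A =====
-- inner loop body of A: state = (counts, key)
def pcInnerA (st : PySem.Dict String (PySem.Dict String Int) × List Char) (c : Char) :
    PySem.Dict String (PySem.Dict String Int) × List Char :=
  let counts := st.1
  let key := st.2
  let counts_char := counts.getD (String.ofList key) PySem.Dict.empty
  let n := counts_char.getD (String.ofList [c]) 0
  let counts_char := counts_char.insert (String.ofList [c]) (n + 1)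
  let counts := counts.insert (String.ofList key) counts_char
  (counts, PySem.List.slice key (some 1) none ++ [c])

def calc_prefix_counts (text : String) : List (String × List (String × Int)) :=
  let counts : PySem.Dict String (PySem.Dict String Int) := PySem.Dict.empty
  let counts := (PySem.Str.split₀ text).foldl (fun counts word =>
      let word_pad := word.toList ++ [' ']            -- word + " "
      -- key starts as " " * LOOK_BACK
      (word_pad.foldl pcInnerA (counts, List.replicate 2 ' ')).1) counts
  counts.items.map (fun kv => (kv.1, kv.2.items))

-- ===== PORT B =====
def calc_prefix_counts_alt (text : String) : List (String × List (String × Int)) :=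
  -- phase 1: pairs += zip((a+b for a,b in zip(s, s[1:])), s[2:])
  let pairs := (PySem.Str.split₀ text).foldl (fun pairs word =>
      let s := List.replicate 2 ' ' ++ word.toList ++ [' ']   -- " " * LOOK_BACK + word + " "
      pairs ++ ((s.zip s.tail).map (fun ab => String.ofList [ab.1, ab.2])).zip
               ((s.drop 2).map (fun c => String.ofList [c]))) []
  -- phase 2: groups.setdefault(ctx, []).append(ch)
  let groups := pairs.foldl
      (fun (g : PySem.Dict String (List String)) p => g.modify p.1 [] (· ++ [p.2]))
      PySem.Dict.empty
  -- phase 3: the two dict comprehensions build dicts over DISTINCT keys (groups' keys,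
  -- resp. dict.fromkeys of a group), so each is exactly a map producing the items in order
  groups.items.map (fun kv =>
      (kv.1, (PySem.List.dedup kv.2).map (fun ch => (ch, (kv.2.count ch : Int)))))

-- ===== PRECONDITION & SPEC =====
def Spec_calc_prefix_counts (text : String) (out : List (String × List (String × Int))) : Prop := out = calc_prefix_counts_alt text
instance (text : String) (out : List (String × List (String × Int))) : Decidable (Spec_calc_prefix_counts text out) := by unfold Spec_calc_prefix_counts; infer_instance

-- ===== CLAIM (what is proved, stated in full; the proofs are below) =====
def Claim_equal_calc_prefix_counts : Prop := ∀ (text : String), Dom_calc_prefix_counts text → Spec_calc_prefix_counts text (calc_prefix_counts text)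

-- ===== LEMMAS AND PROOFS =====

-- A's per-pair update, as a function of the (context, char) pair
def pcStepA (d : PySem.Dict String (PySem.Dict String Int)) (p : String × String) :
    PySem.Dict String (PySem.Dict String Int) :=
  d.insert p.1 ((d.getD p.1 PySem.Dict.empty).insert p.2
      ((d.getD p.1 PySem.Dict.empty).getD p.2 0 + 1))

-- the (context, char) pair stream generated from key state k over remaining chars
def pcPairsFrom : List Char → List Char → List (String × String)
  | _, [] => []
  | k, c :: cs => (String.ofList k, String.ofList [c]) :: pcPairsFrom (k.drop 1 ++ [c]) cs

-- successor chars of context k in the pair stream ps, and their dedup+count table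
def pcChars (ps : List (String × String)) (k : String) : List String :=
  (ps.filter (fun p => p.1 == k)).map (·.2)

def pcInner (ps : List (String × String)) (k : String) : List (String × Int) :=
  (PySem.Set.ofList (pcChars ps k)).map (fun c => (c, ((pcChars ps k).count c : Int)))

-- 1. A's inner loop = fold of pcStepA over the pair stream
theorem pcInnerA_eq (cs : List Char) : ∀ (k : List Char)
    (d : PySem.Dict String (PySem.Dict String Int)),
    (cs.foldl pcInnerA (d, k)).1 = (pcPairsFrom k cs).foldl pcStepA d := by
  induction cs with
  | nil => intro k d; rfl
  | cons c cs ih =>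
      intro k d
      have h1 : PySem.List.slice k (some 1) none = k.drop 1 :=
        PySem.List.slice_from k (by norm_num)
      simp only [List.foldl, pcPairsFrom, pcInnerA, h1]
      exact ih _ _

-- 2. A's dict = fold of pcStepA over the flat pair stream
theorem pcA_foldl (ws : List String) : ∀ (d : PySem.Dict String (PySem.Dict String Int)),
    ws.foldl (fun counts word =>
        ((word.toList ++ [' ']).foldl pcInnerA (counts, List.replicate 2 ' ')).1) d =
      (ws.flatMap (fun w => pcPairsFrom (List.replicate 2 ' ') (w.toList ++ [' ']))).foldl
        pcStepA d := by
  induction ws with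
  | nil => intro d; rfl
  | cons w ws ih =>
      intro d
      rw [List.foldl_cons, pcInnerA_eq, ih, List.flatMap_cons, List.foldl_append]

theorem pcA_eq (text : String) :
    calc_prefix_counts text =
      (((PySem.Str.split₀ text).flatMap
          (fun w => pcPairsFrom (List.replicate 2 ' ') (w.toList ++ [' ']))).foldl
          pcStepA PySem.Dict.empty).items.map (fun kv => (kv.1, kv.2.items)) := by
  show List.map (fun kv => (kv.1, kv.2.items))
      ((List.foldl (fun counts word =>
          (List.foldl pcInnerA (counts, List.replicate 2 ' ') (word.toList ++ [' '])).1)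
        PySem.Dict.empty (PySem.Str.split₀ text)).items) = _
  rw [pcA_foldl]

-- 3. B's zip windows over the padded word are exactly the pair stream
theorem pcZip (cs : List Char) : ∀ (a b : Char),
    (((a :: b :: cs).zip (b :: cs)).map (fun ab => String.ofList [ab.1, ab.2])).zip
        (cs.map (fun c => String.ofList [c])) = pcPairsFrom [a, b] cs := by
  induction cs with
  | nil => intro a b; rfl
  | cons c cs ih =>
      intro a b
      show (String.ofList [a, b], String.ofList [c]) ::
          (((b :: c :: cs).zip (c :: cs)).map (fun ab => String.ofList [ab.1, ab.2])).zip
            (cs.map (fun c => String.ofList [c])) = _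
      rw [ih b c]
      rfl

-- 4. B's phase-1 fold builds the flat pair stream
theorem pcB_pairs (text : String) :
    (PySem.Str.split₀ text).foldl (fun pairs word =>
        let s := List.replicate 2 ' ' ++ word.toList ++ [' ']
        pairs ++ ((s.zip s.tail).map (fun ab => String.ofList [ab.1, ab.2])).zip
                 ((s.drop 2).map (fun c => String.ofList [c]))) [] =
      (PySem.Str.split₀ text).flatMap
        (fun w => pcPairsFrom (List.replicate 2 ' ') (w.toList ++ [' '])) := by
  rw [PySem.List.foldl_append_eq_flatMap]
  apply List.flatMap_congr
  intro w _
  have hs : List.replicate 2 ' ' ++ w.toList ++ [' '] =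
      ' ' :: ' ' :: (w.toList ++ [' ']) := by simp
  rw [hs]
  exact pcZip (w.toList ++ [' ']) ' ' ' '

-- 5. lookup in a table keyed by a function of the key
theorem pcLookupTable (l : List String) (f : String → Int) (c : String) (d : Int) :
    (PySem.Dict.mk (l.map (fun x => (x, f x)))).getD c d =
      if c ∈ l then f c else d := by
  induction l with
  | nil => simp [PySem.Dict.getD, PySem.Dict.get?]
  | cons x l ih =>
      rw [List.map_cons, PySem.Dict.getD_eq_get?_getD, PySem.Dict.get?_mk_cons]
      by_cases hx : x = c
      · simp [hx]
      · have hb : (x == c) = false := by simpa using hx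
        rw [hb, if_neg (by simp), ← PySem.Dict.getD_eq_get?_getD, ih]
        simp [Ne.symm hx]

-- pcChars over an appended pair
theorem pcChars_append_self (ps : List (String × String)) (p : String × String) :
    pcChars (ps ++ [p]) p.1 = pcChars ps p.1 ++ [p.2] := by
  simp [pcChars, List.filter_append]

theorem pcChars_append_ne (ps : List (String × String)) (p : String × String)
    (x : String) (h : p.1 ≠ x) : pcChars (ps ++ [p]) x = pcChars ps x := by
  simp [pcChars, List.filter_append, h]

theorem pcChars_nil_of_not_mem (ps : List (String × String)) (k : String)
    (h : k ∉ ps.map (·.1)) : pcChars ps k = [] := by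
  unfold pcChars
  rw [List.filter_eq_nil_iff.mpr, List.map_nil]
  intro q hq
  simp only [beq_iff_eq]
  intro hqk
  exact h (hqk ▸ List.mem_map_of_mem hq)

theorem pcInner_append_ne (ps : List (String × String)) (p : String × String)
    (x : String) (h : p.1 ≠ x) : pcInner (ps ++ [p]) x = pcInner ps x := by
  simp [pcInner, pcChars_append_ne ps p x h]

-- bumping the count of c in a dedup+count table = Dict.insert of the new count
theorem pcTableInsert (chs : List String) (c : String) :
    (PySem.Dict.mk ((PySem.Set.ofList chs).map
        (fun x => (x, (chs.count x : Int))))).insert c ((chs.count c : Int) + 1) =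
      PySem.Dict.mk ((PySem.Set.ofList (chs ++ [c])).map
        (fun x => (x, ((chs ++ [c]).count x : Int)))) := by
  apply PySem.Dict.ext
  by_cases hc : c ∈ chs
  · have hck : c ∈ PySem.Set.ofList chs := (PySem.Set.mem_ofList _ _).mpr hc
    have hcont : (PySem.Dict.mk ((PySem.Set.ofList chs).map
        (fun x => (x, (chs.count x : Int))))).contains c = true := by
      apply List.any_eq_true.mpr
      exact ⟨(c, (chs.count c : Int)), List.mem_map_of_mem hck, by simp⟩
    rw [PySem.Dict.items_insert_of_contains _ _ hcont]
    show (List.map _ _).map _ = _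
    rw [List.map_map, PySem.Set.ofList_append_singleton, PySem.Set.add_of_mem hck]
    apply List.map_congr_left
    intro x _
    by_cases hx : x = c
    · simp [hx, List.count_append]
    · have hb : (x == c) = false := by simpa using hx
      have : [c].count x = 0 := by
        rw [List.count_singleton']
        simp only [ite_eq_right_iff]
        exact fun h => absurd h.symm hx
      simp [Function.comp, hb, List.count_append, this]
  · have hcont : (PySem.Dict.mk ((PySem.Set.ofList chs).map
        (fun x => (x, (chs.count x : Int))))).contains c = false := by
      apply Bool.eq_false_iff.mpr
      intro hany
      obtain ⟨q, hq, hbq⟩ := List.any_eq_true.mp hany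
      obtain ⟨x, hx, hxq⟩ := List.mem_map.mp hq
      have : x = c := by
        have := hbq
        rw [← hxq] at this
        simpa using this
      exact hc ((PySem.Set.mem_ofList _ _).mp (this ▸ hx))
    rw [PySem.Dict.items_insert_of_not_contains _ _ hcont]
    show (PySem.Set.ofList chs).map _ ++ _ = _
    rw [PySem.Set.ofList_append_singleton,
      PySem.Set.add_of_not_mem (fun h => hc ((PySem.Set.mem_ofList _ _).mp h)), List.map_append]
    have h0 : chs.count c = 0 := List.count_eq_zero.mpr hc
    congr 1
    · apply List.map_congr_left
      intro x hx
      have hxc : x ≠ c := fun h => hc (h ▸ (PySem.Set.mem_ofList _ _).mp hx)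
      have : [c].count x = 0 := by
        rw [List.count_singleton']
        simp only [ite_eq_right_iff]
        exact fun h => absurd h.symm hxc
      simp [List.count_append, this]
    · simp [List.count_append, h0]

-- pcTableInsert restated through pcInner/pcChars
theorem pcTableInsert' (ps : List (String × String)) (p : String × String) :
    (PySem.Dict.mk (pcInner ps p.1)).insert p.2
        (((pcChars ps p.1).count p.2 : Int) + 1) =
      PySem.Dict.mk (pcInner (ps ++ [p]) p.1) := by
  unfold pcInner
  rw [pcChars_append_self]
  exact pcTableInsert _ _

-- 6. MAIN: the fold of pcStepA, characterised as dedup keys with dedup+count tables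
theorem pcMain (ps : List (String × String)) :
    (ps.foldl pcStepA PySem.Dict.empty).items =
      (PySem.Set.ofList (ps.map (·.1))).map
        (fun k => (k, PySem.Dict.mk (pcInner ps k))) := by
  induction ps using List.reverseRecOn with
  | nil => rfl
  | append_singleton ps p ih =>
      rw [List.foldl_append, List.foldl_cons, List.foldl_nil]
      set D := ps.foldl pcStepA PySem.Dict.empty with hD
      have hkeys : D.keys = PySem.Set.ofList (ps.map (·.1)) := by
        rw [show D.keys = D.items.map (·.1) from rfl, ih, List.map_map]
        exact List.map_id _
      by_cases hk : p.1 ∈ ps.map (·.1)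
      · -- context already present
        have hnod : D.keys.Nodup := by rw [hkeys]; exact PySem.Set.nodup_ofList _
        have hmem : (p.1, PySem.Dict.mk (pcInner ps p.1)) ∈ D.items := by
          rw [ih]
          exact List.mem_map_of_mem ((PySem.Set.mem_ofList _ _).mpr hk)
        have hgd : D.getD p.1 PySem.Dict.empty = PySem.Dict.mk (pcInner ps p.1) :=
          PySem.Dict.getD_of_mem_items _ hmem hnod _
        have hcont : D.contains p.1 = true := by
          rw [PySem.Dict.contains_iff_mem_keys, hkeys]
          exact (PySem.Set.mem_ofList _ _).mpr hk
        have hin : (PySem.Dict.mk (pcInner ps p.1)).getD p.2 0 =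
            ((pcChars ps p.1).count p.2 : Int) := by
          unfold pcInner
          rw [pcLookupTable]
          by_cases hc : p.2 ∈ pcChars ps p.1
          · rw [if_pos ((PySem.Set.mem_ofList _ _).mpr hc)]
          · rw [if_neg (fun h => hc ((PySem.Set.mem_ofList _ _).mp h)),
              List.count_eq_zero.mpr hc]
            exact Nat.cast_zero.symm
        show (D.insert p.1 _).items = _
        rw [hgd, hin, pcTableInsert', PySem.Dict.items_insert_of_contains _ _ hcont, ih,
          List.map_map]
        rw [List.map_append, List.map_cons, List.map_nil,
          PySem.Set.ofList_append_singleton, PySem.Set.add_of_mem ((PySem.Set.mem_ofList _ _).mpr hk)]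
        apply List.map_congr_left
        intro x _
        by_cases hx : x = p.1
        · subst hx
          simp only [Function.comp]
          rw [if_pos (by simp)]
        · simp only [Function.comp]
          rw [if_neg (by simpa using hx), pcInner_append_ne ps p x (fun h => hx h.symm)]
      · -- fresh context
        have hcont : D.contains p.1 = false := by
          apply Bool.eq_false_iff.mpr
          intro h
          rw [PySem.Dict.contains_iff_mem_keys, hkeys] at h
          exact hk ((PySem.Set.mem_ofList _ _).mp h)
        have hgd : D.getD p.1 PySem.Dict.empty = PySem.Dict.empty :=
          PySem.Dict.getD_of_not_contains _ _ hcont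
        show (D.insert p.1 _).items = _
        rw [hgd, PySem.Dict.items_insert_of_not_contains _ _ hcont, ih,
          List.map_append, List.map_cons, List.map_nil,
          PySem.Set.ofList_append_singleton,
          PySem.Set.add_of_not_mem (fun h => hk ((PySem.Set.mem_ofList _ _).mp h)),
          List.map_append]
        congr 1
        · apply List.map_congr_left
          intro x hx
          have hxp : p.1 ≠ x := fun h => hk (h ▸ (PySem.Set.mem_ofList _ _).mp hx)
          rw [pcInner_append_ne ps p x hxp]
        · have hchars : pcChars (ps ++ [p]) p.1 = [p.2] := by
            rw [pcChars_append_self, pcChars_nil_of_not_mem ps p.1 hk, List.nil_append]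
          have hinner : pcInner (ps ++ [p]) p.1 = [(p.2, (1:Int))] := by
            unfold pcInner
            rw [hchars]
            simp [PySem.Set.ofList_cons, PySem.Set.ofList_nil, PySem.Set.discard]
          have hins : PySem.Dict.empty.insert p.2
              ((PySem.Dict.empty.getD p.2 (0:Int)) + 1) =
              PySem.Dict.mk [(p.2, (1:Int))] := by
            apply PySem.Dict.ext
            rw [PySem.Dict.items_insert_of_not_contains _ _ (PySem.Dict.contains_empty _),
              PySem.Dict.getD_empty]
            simp [PySem.Dict.empty]
          simp only [List.map_cons, List.map_nil]
          rw [hinner, hins]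

-- the flat (context, successor) pair stream of a text
def pcFlat (text : String) : List (String × String) :=
  (PySem.Str.split₀ text).flatMap
    (fun w => pcPairsFrom (List.replicate 2 ' ') (w.toList ++ [' ']))

-- 7. B, characterised the same way
theorem pcB_eq (text : String) :
    calc_prefix_counts_alt text =
      (PySem.Set.ofList ((pcFlat text).map (·.1))).map
        (fun k => (k, pcInner (pcFlat text) k)) := by
  simp only [calc_prefix_counts_alt]
  rw [pcB_pairs,
    show (List.flatMap (fun w => pcPairsFrom (List.replicate 2 ' ') (w.toList ++ [' ']))
        (PySem.Str.split₀ text)) = pcFlat text from rfl]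
  set g := (pcFlat text).foldl
      (fun (g : PySem.Dict String (List String)) p => g.modify p.1 [] (· ++ [p.2]))
      PySem.Dict.empty with hg
  have hkeys : g.keys = PySem.Set.ofList ((pcFlat text).map (·.1)) := by
    rw [hg, PySem.Dict.keys_foldl_modify_key (pcFlat text) (·.1) []
        (fun _ p => (· ++ [p.2])) PySem.Dict.empty]
    exact PySem.Set.update_nil_left _
  have hnod : g.keys.Nodup := by rw [hkeys]; exact PySem.Set.nodup_ofList _
  have hgd : ∀ c, g.getD c [] = pcChars (pcFlat text) c := by
    intro c
    rw [hg, PySem.Dict.getD_foldl_modify_append, PySem.Dict.getD_empty]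
    rfl
  rw [PySem.Dict.items_eq_map_keys g hnod [], List.map_map, hkeys]
  apply List.map_congr_left
  intro k _
  simp only [Function.comp, hgd k]
  rw [PySem.List.dedup_eq_ofList]
  rfl

-- ===== VERDICT (by name: the statement is the Claim_ definition above) =====
theorem calc_prefix_counts_spec : Claim_equal_calc_prefix_counts := by
  intro text _
  unfold Spec_calc_prefix_counts
  rw [pcB_eq, pcA_eq, pcMain, List.map_map]
  rfl
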